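-- pv_equiv track=rewrite | github.com/Shushant-k1/hackerrank | data structure and algorithms/greedy/Chief Hopper.py | chiefHopper
-- ===== SOURCE A (Python) =====
-- def chiefHopper(arr):
--     start_energy = 0
--     for i in range(10**10):
--         energy = start_energy
--         # check for current energy
--         for item in arr:
--             energy = energy * 2 - item
--             if energy < 0:
--                 break
--         if energy >= 0:
--             return start_energy
--         start_energy = i
-- ===== SOURCE B (Python) =====
-- def chiefHopper(arr):
--     # Backward pass: minimal energy needed before each step, O(n).
--     energy = 0
--     for h in reversed(arr):
--         energy = max(0, (energy + h + 1) // 2)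
--     return energy
-- ===== Notes on version B (the rewrite author's own statement) =====
-- stated objective: faster
-- what changed: Replaces A's linear search over candidate starting energies (each candidate re-simulating the whole jump sequence) with a single backward pass computing energy = max(0, ceil((energy+h)/2)) from the end.
import Mathlib
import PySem

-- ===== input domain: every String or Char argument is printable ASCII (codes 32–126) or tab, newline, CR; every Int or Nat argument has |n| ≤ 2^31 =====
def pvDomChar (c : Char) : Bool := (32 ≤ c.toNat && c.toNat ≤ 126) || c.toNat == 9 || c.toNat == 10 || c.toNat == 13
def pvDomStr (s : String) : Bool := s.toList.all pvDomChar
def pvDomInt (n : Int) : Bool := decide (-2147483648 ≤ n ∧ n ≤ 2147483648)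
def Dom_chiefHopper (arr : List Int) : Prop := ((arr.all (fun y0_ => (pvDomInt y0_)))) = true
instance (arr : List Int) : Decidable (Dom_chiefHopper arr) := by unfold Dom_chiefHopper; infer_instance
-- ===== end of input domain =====

-- B replaces A's linear search over starting energies (each re-simulating all jumps)
-- with a single backward pass energy = max(0, ceil((energy+h)/2)); objective: faster (asymptotic).


-- ===== PORT A =====
-- inner loop: energy = energy*2 - item, break as soon as energy < 0
def runA : List Int → Int → Int
  | [], energy => energy
  | item :: rest, energy =>
    let energy' := energy * 2 - item
    if energy' < 0 then energy' else runA rest energy'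

-- outer loop 'for i in range(10**10)', carrying i and start_energy;
-- fuel exhaustion (Python would fall off the loop returning None) yields 0, unreachable on Dom
def loopA (arr : List Int) : Nat → Int → Int → Int
  | 0, _i, _s => 0
  | fuel + 1, i, s => if 0 ≤ runA arr s then s else loopA arr fuel (i + 1) i

def chiefHopper (arr : List Int) : Int := loopA arr (10 ^ 10) 0 0

-- ===== PORT B =====
def chiefHopper_alt (arr : List Int) : Int :=
  arr.reverse.foldl (fun energy h => max 0 (PySem.Int.floordiv (energy + h + 1) 2)) 0

-- ===== PRECONDITION & SPEC =====
def Spec_chiefHopper (arr : List Int) (out : Int) : Prop := out = chiefHopper_alt arr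
instance (arr : List Int) (out : Int) : Decidable (Spec_chiefHopper arr out) := by unfold Spec_chiefHopper; infer_instance

-- ===== CLAIM (what is proved, stated in full; the proofs are below) =====
def Claim_equal_chiefHopper : Prop := ∀ (arr : List Int), Dom_chiefHopper arr → Spec_chiefHopper arr (chiefHopper arr)

-- ===== LEMMAS AND PROOFS =====

-- the backward requirement, as a foldr (equal to B's foldl over the reversed list)
def req (arr : List Int) : Int :=
  arr.foldr (fun h r => max 0 (PySem.Int.floordiv (r + h + 1) 2)) 0

theorem alt_eq_req (arr : List Int) : chiefHopper_alt arr = req arr := by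
  simp [chiefHopper_alt, req, List.foldl_reverse]

theorem req_nonneg (arr : List Int) : 0 ≤ req arr := by
  cases arr with
  | nil => simp [req]
  | cons h t => simp [req]

theorem req_le (arr : List Int) (hd : Dom_chiefHopper arr) : req arr ≤ 2147483648 := by
  induction arr with
  | nil => simp [req]
  | cons h t ih =>
    have hdt : Dom_chiefHopper t := by
      simp [Dom_chiefHopper, List.all_cons] at hd ⊢; exact hd.2
    have hh : h ≤ 2147483648 := by
      simp [Dom_chiefHopper, List.all_cons, pvDomInt] at hd; exact hd.1.2
    have ht := ih hdt
    have hr0 := req_nonneg t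
    show max 0 (PySem.Int.floordiv (req t + h + 1) 2) ≤ 2147483648
    rw [PySem.Int.floordiv_eq_ediv_of_pos (by omega)]
    omega

-- characterisation: for nonnegative energy, A's simulation stays nonnegative iff energy ≥ req
theorem runA_char (arr : List Int) : ∀ e : Int, 0 ≤ e → (0 ≤ runA arr e ↔ req arr ≤ e) := by
  induction arr with
  | nil => intro e he; simp [runA, req]
  | cons h t ih =>
    intro e he
    have hr0 := req_nonneg t
    show (0 ≤ if e * 2 - h < 0 then e * 2 - h else runA t (e * 2 - h)) ↔
      max 0 (PySem.Int.floordiv (req t + h + 1) 2) ≤ e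
    rw [PySem.Int.floordiv_eq_ediv_of_pos (show (0:Int) < 2 by omega)]
    by_cases hb : e * 2 - h < 0
    · rw [if_pos hb]; omega
    · rw [if_neg hb]
      rw [ih (e * 2 - h) (by omega)]
      omega

-- the outer loop returns req arr, given enough fuel; the invariant ties i to s
theorem loopA_eq (arr : List Int) :
    ∀ (fuel : Nat) (i s : Int), 0 ≤ s → s ≤ req arr → (i = s + 1 ∨ (i = 0 ∧ s = 0)) →
      req arr + 2 ≤ i + (fuel : Int) → loopA arr fuel i s = req arr := by
  intro fuel
  induction fuel with
  | zero => intro i s hs0 hsr hi hf; simp at hf; omega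
  | succ n ih =>
    intro i s hs0 hsr hi hf
    show (if 0 ≤ runA arr s then s else loopA arr n (i + 1) i) = req arr
    by_cases hok : 0 ≤ runA arr s
    · have := (runA_char arr s hs0).mp hok
      simp [hok]; omega
    · have hlt : ¬ req arr ≤ s := fun hc => hok ((runA_char arr s hs0).mpr hc)
      simp [hok]
      exact ih (i + 1) i (by omega) (by omega) (by omega) (by push_cast at hf ⊢; omega)

-- ===== VERDICT (by name: the statement is the Claim_ definition above) =====
theorem chiefHopper_spec : Claim_equal_chiefHopper := by
  intro arr hd
  show chiefHopper arr = chiefHopper_alt arr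
  rw [alt_eq_req, chiefHopper]
  exact loopA_eq arr (10 ^ 10) 0 0 le_rfl (req_nonneg arr) (Or.inr ⟨rfl, rfl⟩)
    (by have := req_le arr hd; push_cast; omega)
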